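-- pv_equiv track=rewrite | github.com/parthchandak02/literature-review-assistant | src/export/markdown_refs.py | _capitalize_name_part
-- ===== SOURCE A (Python) =====
-- def _capitalize_name_part(name: str) -> str:
--     """Capitalize each word in a name part, preserving hyphenated names.
--
--     Examples:
--       'han-na' -> 'Han-na'
--       'k lynette' -> 'K. Lynette'  (initial without period)
--       'mcdonald' -> 'McDonald' (naive; full de/van/von handling not implemented)
--     """
--     if not name:
--         return name
--     # Handle hyphenated names: capitalize each segment
--     segments = name.split("-")
--     capitalized = []
--     for seg in segments:
--         # Capitalize first char only; preserve rest (e.g. "na" stays "na" not "Na")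
--         capitalized.append(seg[0].upper() + seg[1:] if seg else seg)
--     return "-".join(capitalized)
-- ===== SOURCE B (Python) =====
-- def _capitalize_name_part(name: str) -> str:
--     """Capitalize each hyphen-separated segment in one pass over the characters."""
--     if not name:
--         return name
--     out = []
--     boundary = True
--     for ch in name:
--         if ch == '-':
--             out.append(ch)
--             boundary = True
--         elif boundary:
--             out.append(ch.upper())
--             boundary = False
--         else:
--             out.append(ch)
--     return ''.join(out)
-- ===== Notes on version B (the rewrite author's own statement) =====
-- stated objective: alternative
-- what changed: Replaces the split-on-hyphen / per-segment slice / join pipeline with a single character scan that carries an at-boundary flag and upcases the character right after the start or after a hyphen, building the output incrementally.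
import Mathlib
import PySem

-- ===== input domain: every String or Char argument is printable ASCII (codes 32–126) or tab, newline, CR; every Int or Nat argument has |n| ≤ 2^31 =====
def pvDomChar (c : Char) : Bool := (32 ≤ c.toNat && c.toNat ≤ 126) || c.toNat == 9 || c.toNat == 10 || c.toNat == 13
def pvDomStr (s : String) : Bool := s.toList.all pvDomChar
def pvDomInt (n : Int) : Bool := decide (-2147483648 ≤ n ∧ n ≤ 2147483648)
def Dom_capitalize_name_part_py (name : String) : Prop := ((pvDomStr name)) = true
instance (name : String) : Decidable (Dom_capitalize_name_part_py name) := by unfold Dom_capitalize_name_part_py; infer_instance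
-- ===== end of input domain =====

-- B replaces A's split('-')/slice/join pipeline with a single character scan carrying an
-- at-boundary flag; same return value, no mutation involved (objective: alternative).

-- ===== PORT A =====
-- seg[0].upper() + seg[1:] if seg else seg  (seg[0] via pyGet?; the none branch is unreachable since seg ≠ [])
def capSegA (seg : List Char) : List Char :=
  if seg ≠ [] then
    match PySem.Chars.pyGet? seg 0 with
    | some c => PySem.Chars.upper [c] ++ PySem.Chars.slice seg (some 1) none
    | none => seg
  else seg

def capitalize_name_part_py (name : String) : String :=
  if name = "" then name
  else
    let segments := PySem.Chars.splitOn name.toList ['-']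
    let capitalized := segments.foldl (fun acc seg => acc ++ [capSegA seg]) []
    String.ofList (PySem.Chars.join ['-'] capitalized)

-- ===== PORT B =====
-- one pass: (accumulated output, at_boundary flag); ch.upper() on a single char is upperChar
def stepB (s : List Char × Bool) (ch : Char) : List Char × Bool :=
  if ch = '-' then (s.1 ++ [ch], true)
  else if s.2 then (s.1 ++ [PySem.Chars.upperChar ch], false)
  else (s.1 ++ [ch], false)

def capitalize_name_part_py_alt (name : String) : String :=
  if name = "" then name
  else String.ofList (name.toList.foldl stepB ([], true)).1

-- ===== PRECONDITION & SPEC =====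
def Spec_capitalize_name_part_py (name : String) (out : String) : Prop := out = capitalize_name_part_py_alt name
instance (name : String) (out : String) : Decidable (Spec_capitalize_name_part_py name out) := by unfold Spec_capitalize_name_part_py; infer_instance

-- ===== CLAIM (what is proved, stated in full; the proofs are below) =====
def Claim_equal_capitalize_name_part_py : Prop := ∀ (name : String), Dom_capitalize_name_part_py name → Spec_capitalize_name_part_py name (capitalize_name_part_py name)

-- ===== LEMMAS AND PROOFS =====

/-- Reference recursion: capitalize the char after start / after a hyphen, flag = at boundary. -/
def capRec (b : Bool) : List Char → List Char
  | [] => []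
  | c :: cs =>
    if c = '-' then c :: capRec true cs
    else (if b then PySem.Chars.upperChar c else c) :: capRec false cs

/-- Prepend to the first piece (fresh piece if the list is empty). -/
def consFirst (x : List Char) : List (List Char) → List (List Char)
  | [] => [x]
  | h :: t => (x ++ h) :: t

/-- Structural recursion computing split on a single '-'. -/
def splitRec : List Char → List (List Char)
  | [] => [[]]
  | c :: cs => if c = '-' then [] :: splitRec cs else consFirst [c] (splitRec cs)

theorem splitRec_ne_nil (cs : List Char) : splitRec cs ≠ [] := by
  cases cs with
  | nil => simp [splitRec]
  | cons c cs =>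
    simp only [splitRec]
    split
    · simp
    · cases h : splitRec cs <;> simp [consFirst]

theorem splitOn_go_eq (l : List Char) :
    ∀ (fuel : Nat) (cur : List Char) (acc : List (List Char)), l.length ≤ fuel →
      PySem.Chars.splitOn.go ['-'] fuel l cur acc = acc.reverse ++ consFirst cur.reverse (splitRec l) := by
  induction l with
  | nil =>
    intro fuel cur acc _
    cases fuel <;> simp [PySem.Chars.splitOn.go, splitRec, consFirst]
  | cons c rest ih =>
    intro fuel cur acc hle
    cases fuel with
    | zero => simp at hle
    | succ f =>
      simp only [List.length_cons, Nat.succ_le_succ_iff] at hle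
      by_cases hc : c = '-'
      · subst hc
        have hpre : List.isPrefixOf ['-'] ('-' :: rest) = true := by simp [List.isPrefixOf]
        rw [PySem.Chars.splitOn.go, if_pos hpre]
        simp only [List.length_singleton, List.drop_succ_cons, List.drop_zero]
        rw [ih f [] (cur.reverse :: acc) hle]
        rcases h : splitRec rest with _ | ⟨hh, tt⟩
        · exact absurd h (splitRec_ne_nil rest)
        · simp [splitRec, consFirst, h]
      · have hpre : List.isPrefixOf ['-'] (c :: rest) = false := by
          simp [List.isPrefixOf, BEq.beq]
          intro hne; exact absurd hne.symm hc
        rw [PySem.Chars.splitOn.go, if_neg (by simp [hpre])]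
        rw [ih f (c :: cur) acc hle]
        rcases h : splitRec rest with _ | ⟨hh, tt⟩
        · exact absurd h (splitRec_ne_nil rest)
        · simp [splitRec, consFirst, h, hc]

theorem splitOn_eq_splitRec (cs : List Char) :
    PySem.Chars.splitOn cs ['-'] = splitRec cs := by
  rw [PySem.Chars.splitOn, splitOn_go_eq cs (cs.length + 1) [] [] (by omega)]
  rcases h : splitRec cs with _ | ⟨hh, tt⟩
  · exact absurd h (splitRec_ne_nil cs)
  · simp [consFirst]

/-- capSegA on a nonempty segment. -/
theorem capSegA_cons (c : Char) (h : List Char) :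
    capSegA (c :: h) = PySem.Chars.upperChar c :: h := by
  simp [capSegA, PySem.List.pyGet?, PySem.List.pyIdx?, PySem.Chars.upper,
        PySem.List.slice_from (xs := c :: h) (a := 1) (by norm_num)]

theorem capSegA_nil : capSegA [] = [] := by simp [capSegA]

/-- joinCap l = '-'.join(map capSegA l), written structurally. -/
def joinCap : List (List Char) → List Char
  | [] => []
  | h :: t => capSegA h ++ t.flatMap (fun s => '-' :: capSegA s)

/-- The same but with the first piece left as-is (what follows a non-boundary position). -/
def tailJoinF : List (List Char) → List Char
  | [] => []
  | h :: t => h ++ t.flatMap (fun s => '-' :: capSegA s)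

theorem flatten_intersperse (sep h : List Char) (xs : List (List Char)) :
    (List.intersperse sep (h :: xs)).flatten = h ++ xs.flatMap (fun s => sep ++ s) := by
  induction xs generalizing h with
  | nil => simp
  | cons h2 t ih => simp [List.intersperse, ih h2]

theorem join_map_eq_joinCap (l : List (List Char)) :
    PySem.Chars.join ['-'] (l.map capSegA) = joinCap l := by
  cases l with
  | nil => simp [PySem.Chars.join, joinCap, List.intercalate]
  | cons h t =>
    simp [PySem.Chars.join, List.intercalate, joinCap, flatten_intersperse, List.flatMap_map]

theorem joinCap_splitRec (cs : List Char) :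
    joinCap (splitRec cs) = capRec true cs ∧ tailJoinF (splitRec cs) = capRec false cs := by
  induction cs with
  | nil => simp [splitRec, joinCap, tailJoinF, capRec, capSegA_nil]
  | cons c cs ih =>
    rcases h : splitRec cs with _ | ⟨hh, tt⟩
    · exact absurd h (splitRec_ne_nil cs)
    · rw [h] at ih
      by_cases hc : c = '-'
      · subst hc
        constructor <;>
        · simp only [splitRec, h, capRec]
          simp [joinCap, tailJoinF, capSegA_nil, ← ih.1]
      · constructor <;>
        · simp only [splitRec, h, consFirst, capRec, if_neg hc]
          simp [joinCap, tailJoinF, capSegA_cons, ← ih.2]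

/-- A's foldl-append builds the map. -/
theorem foldl_append_map (l : List (List Char)) (acc : List (List Char)) :
    l.foldl (fun acc seg => acc ++ [capSegA seg]) acc = acc ++ l.map capSegA := by
  induction l generalizing acc with
  | nil => simp
  | cons h t ih => simp [ih]

/-- B's fold computes capRec. -/
theorem foldl_stepB (cs : List Char) :
    ∀ (acc : List Char) (b : Bool), (cs.foldl stepB (acc, b)).1 = acc ++ capRec b cs := by
  induction cs with
  | nil => simp [capRec]
  | cons c cs ih =>
    intro acc b
    by_cases hc : c = '-'
    · subst hc; simp [stepB, capRec, ih]
    · cases b <;> simp [stepB, hc, capRec, ih]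

-- ===== VERDICT (by name: the statement is the Claim_ definition above) =====
theorem capitalize_name_part_py_spec : Claim_equal_capitalize_name_part_py := by
  intro name _
  unfold Spec_capitalize_name_part_py capitalize_name_part_py capitalize_name_part_py_alt
  by_cases h : name = ""
  · simp [h]
  · simp only [if_neg h]
    rw [foldl_stepB, splitOn_eq_splitRec, foldl_append_map, List.nil_append, List.nil_append,
      join_map_eq_joinCap, (joinCap_splitRec name.toList).1]
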